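-- pv_equiv track=rewrite | github.com/ROCm/aotriton | v3python/gpu_targets.py | cluster_gpus
-- ===== SOURCE A (Python) =====
-- from collections import defaultdict
--
-- def gpu2arch(gpu : str) -> str:
--     return gpu.split('_mod')[0]
--
-- def cluster_gpus(gpus : list[str]) -> dict[str : list[str]]:
--     ret = defaultdict(list)
--     for gpu in gpus:
--         arch = gpu2arch(gpu)
--         ret[arch].append(gpu)
--     for k, v in ret.items():
--         ret[k] = sorted(v)
--     return ret
-- ===== SOURCE B (Python) =====
-- from collections import defaultdict
--
-- def gpu2arch(gpu: str) -> str: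
--     return gpu.split('_mod')[0]
--
-- def _insort(bucket: list, gpu: str) -> None:
--     """Insert gpu into the already-sorted bucket, keeping it sorted."""
--     i = 0
--     while i < len(bucket) and bucket[i] <= gpu:
--         i += 1
--     bucket.insert(i, gpu)
--
-- def cluster_gpus(gpus):
--     # single pass: each bucket is kept sorted by insertion, so no sort pass is needed
--     ret = defaultdict(list)
--     for gpu in gpus:
--         _insort(ret[gpu2arch(gpu)], gpu)
--     return ret
-- ===== Notes on version B (the rewrite author's own statement) =====
-- stated objective: alternative
-- what changed: B keeps every bucket sorted at all times by inserting each gpu at its sorted position (one insertion-sort pass), instead of A's append-everything-then-sort-each-bucket two-phase scheme.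
import Mathlib
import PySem

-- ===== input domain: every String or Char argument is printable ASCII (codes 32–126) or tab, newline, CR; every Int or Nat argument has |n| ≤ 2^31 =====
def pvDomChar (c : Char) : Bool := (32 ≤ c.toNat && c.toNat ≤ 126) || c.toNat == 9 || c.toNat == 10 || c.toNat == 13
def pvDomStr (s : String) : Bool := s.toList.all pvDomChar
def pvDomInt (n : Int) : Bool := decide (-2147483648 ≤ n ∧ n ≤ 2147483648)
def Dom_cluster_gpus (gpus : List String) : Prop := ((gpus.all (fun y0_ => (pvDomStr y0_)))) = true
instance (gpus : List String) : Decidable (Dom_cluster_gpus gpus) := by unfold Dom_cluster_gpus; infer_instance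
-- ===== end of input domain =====

-- B keeps every bucket sorted at all times by inserting each gpu at its sorted
-- position (one insertion pass, no per-bucket sort phase) — objective: alternative.

-- ===== PORT A =====
-- gpu.split('_mod')[0]: the separator is nonempty so split? is `some`, and a split result is
-- never empty, so neither getD default is ever used — exact.
def gpu2archA (gpu : String) : String :=
  PySem.List.pyGetD ((PySem.Str.split? gpu "_mod").getD []) 0 ""

def cluster_gpus (gpus : List String) : List (String × List String) :=
  -- ret = defaultdict(list); for gpu in gpus: ret[gpu2arch(gpu)].append(gpu)
  let ret : PySem.Dict String (List String) :=
    gpus.foldl (fun d g => d.modify (gpu2archA g) [] (fun v => v ++ [g])) PySem.Dict.empty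
  -- for k, v in ret.items(): ret[k] = sorted(v)
  let ret2 :=
    ret.items.foldl (fun d kv => d.insert kv.1 (PySem.List.sorted kv.2 (fun x => x) false)) ret
  ret2.items

-- ===== PORT B =====
def gpu2archB (gpu : String) : String :=
  PySem.List.pyGetD ((PySem.Str.split? gpu "_mod").getD []) 0 ""

-- the while loop of _insort: i = 0; while i < len(bucket) and bucket[i] <= gpu: i += 1
def insortPos (bucket : List String) (gpu : String) : Nat :=
  match bucket with
  | [] => 0
  | y :: ys => if y ≤ gpu then insortPos ys gpu + 1 else 0

-- bucket.insert(i, gpu)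
def insort (bucket : List String) (gpu : String) : List String :=
  PySem.List.insert bucket ((insortPos bucket gpu : Nat) : Int) gpu

def cluster_gpus_alt (gpus : List String) : List (String × List String) :=
  -- ret = defaultdict(list); for gpu in gpus: _insort(ret[gpu2arch(gpu)], gpu)
  let ret : PySem.Dict String (List String) :=
    gpus.foldl (fun d g => d.modify (gpu2archB g) [] (fun b => insort b g)) PySem.Dict.empty
  ret.items

-- ===== PRECONDITION & SPEC =====
def Spec_cluster_gpus (gpus : List String) (out : List (String × List String)) : Prop := out = cluster_gpus_alt gpus
instance (gpus : List String) (out : List (String × List String)) : Decidable (Spec_cluster_gpus gpus out) := by unfold Spec_cluster_gpus; infer_instance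

-- ===== CLAIM (what is proved, stated in full; the proofs are below) =====
def Claim_equal_cluster_gpus : Prop := ∀ (gpus : List String), Dom_cluster_gpus gpus → Spec_cluster_gpus gpus (cluster_gpus gpus)

-- ===== LEMMAS AND PROOFS =====

-- insortPos never passes the end of the bucket
lemma insortPos_le_length (bucket : List String) (gpu : String) :
    insortPos bucket gpu ≤ bucket.length := by
  induction bucket with
  | nil => simp [insortPos]
  | cons y ys ih =>
    simp only [insortPos, List.length_cons]
    split_ifs <;> omega

-- insort unfolded on a cons cell
lemma insort_cons (y : String) (ys : List String) (gpu : String) :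
    insort (y :: ys) gpu =
      if y ≤ gpu then y :: insort ys gpu else gpu :: y :: ys := by
  rw [show insort (y :: ys) gpu
        = PySem.List.insert (y :: ys)
            (((if y ≤ gpu then insortPos ys gpu + 1 else 0 : Nat)) : Int) gpu from rfl]
  split_ifs with h
  · rw [PySem.List.insert_natCast _ _ _
        (by simpa using Nat.succ_le_succ (insortPos_le_length ys gpu)),
      show insort ys gpu = PySem.List.insert ys ((insortPos ys gpu : Nat) : Int) gpu from rfl,
      PySem.List.insert_natCast _ _ _ (insortPos_le_length ys gpu)]
    simp
  · rw [show ((0 : Nat) : Int) = 0 from rfl, PySem.List.insert_zero]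

lemma insort_perm (bucket : List String) (gpu : String) :
    (insort bucket gpu).Perm (gpu :: bucket) := by
  induction bucket with
  | nil => simp [insort, insortPos, PySem.List.insert_zero]
  | cons y ys ih =>
    rw [insort_cons]
    split_ifs with h
    · exact ((ih.cons y).trans (List.Perm.swap gpu y ys))
    · exact List.Perm.refl _

lemma mem_insort (x : String) (bucket : List String) (gpu : String) :
    x ∈ insort bucket gpu ↔ x = gpu ∨ x ∈ bucket := by
  rw [(insort_perm bucket gpu).mem_iff]; simp

-- inserting into an ordered bucket keeps it ordered
lemma insort_pairwise (bucket : List String) (gpu : String)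
    (h : bucket.Pairwise (· ≤ ·)) :
    (insort bucket gpu).Pairwise (· ≤ ·) := by
  induction bucket with
  | nil => simp [insort, insortPos, PySem.List.insert_zero]
  | cons y ys ih =>
    rw [insort_cons]
    rcases List.pairwise_cons.mp h with ⟨hy, hys⟩
    split_ifs with hle
    · refine List.pairwise_cons.mpr ⟨?_, ih hys⟩
      intro x hx
      rcases (mem_insort x ys gpu).mp hx with rfl | hx'
      · exact hle
      · exact hy x hx'
    · refine List.pairwise_cons.mpr ⟨?_, h⟩
      intro x hx
      have hgy : gpu ≤ y := le_of_not_ge hle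
      rcases List.mem_cons.mp hx with rfl | hx'
      · exact hgy
      · exact hgy.trans (hy x hx')

-- the insertion loop from any accumulator: a permutation of acc ++ xs
lemma foldl_insort_perm (xs : List String) (acc : List String) :
    (xs.foldl insort acc).Perm (acc ++ xs) := by
  induction xs generalizing acc with
  | nil => simp
  | cons x xs ih =>
    simp only [List.foldl_cons]
    refine (ih (insort acc x)).trans ?_
    have : (insort acc x ++ xs).Perm ((x :: acc) ++ xs) :=
      ((insort_perm acc x).append_right xs)
    refine this.trans ?_
    simpa using (List.perm_middle (a := x) (l₁ := acc) (l₂ := xs)).symm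

lemma foldl_insort_pairwise (xs : List String) (acc : List String)
    (h : acc.Pairwise (· ≤ ·)) :
    (xs.foldl insort acc).Pairwise (· ≤ ·) := by
  induction xs generalizing acc with
  | nil => exact h
  | cons x xs ih => exact ih _ (insort_pairwise acc x h)

-- the insertion loop from [] computes exactly sorted(xs)
lemma foldl_insort_eq_sorted (xs : List String) :
    xs.foldl insort [] = PySem.List.sorted xs (fun x => x) false :=
  (PySem.List.sorted_id_eq_of_perm_of_pairwise _ _
    (by simpa using foldl_insort_perm xs [])
    (foldl_insort_pairwise xs [] (by simp))).symm

-- the grouping dict built by appending each element of xs to the bucket of its architecture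
def pvGroup (xs : List String) : PySem.Dict String (List String) :=
  xs.foldl (fun d g => d.modify (gpu2archA g) [] (fun v => v ++ [g])) PySem.Dict.empty

lemma pvGroup_getD (xs : List String) (c : String) :
    (pvGroup xs).getD c [] = xs.filter (fun g => gpu2archA g == c) := by
  have h := PySem.Dict.getD_foldl_modify_append (xs.map (fun g => (gpu2archA g, g)))
    (PySem.Dict.empty : PySem.Dict String (List String)) c
  rw [List.foldl_map] at h
  simpa [pvGroup, List.filter_map, Function.comp_def] using h

lemma pvGroup_keys (xs : List String) :
    (pvGroup xs).keys = PySem.List.dedup (xs.map gpu2archA) := by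
  have h := PySem.Dict.keys_foldl_modify_key xs gpu2archA []
    (fun _ g v => v ++ [g]) (PySem.Dict.empty : PySem.Dict String (List String))
  simpa [pvGroup, PySem.List.dedup_eq_ofList, PySem.Set.ofList, PySem.Set.update] using h

lemma pvGroup_keys_nodup (xs : List String) : (pvGroup xs).keys.Nodup := by
  exact PySem.Dict.nodup_keys_foldl_modify_key xs gpu2archA []
    (fun _ g v => v ++ [g]) PySem.Dict.empty (by simp)

-- an insert-loop over keys not containing k leaves getD k unchanged
lemma foldl_insert_getD_not_mem (L : List String) (v : String → List String)
    (d : PySem.Dict String (List String)) (k : String) (dflt : List String) (hk : k ∉ L) :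
    (L.foldl (fun d a => d.insert a (v a)) d).getD k dflt = d.getD k dflt := by
  induction L generalizing d with
  | nil => rfl
  | cons a L ih =>
    simp only [List.foldl_cons]
    rw [ih _ (fun h => hk (List.mem_cons_of_mem _ h)),
        PySem.Dict.getD_insert_of_ne _ _ _ (fun h : k = a => hk (h ▸ List.mem_cons_self))]

-- an insert-loop over distinct keys sets getD k to v k for every k in the list
lemma foldl_insert_getD_mem (L : List String) (v : String → List String)
    (d : PySem.Dict String (List String)) (k : String) (dflt : List String)
    (hnd : L.Nodup) (hk : k ∈ L) :
    (L.foldl (fun d a => d.insert a (v a)) d).getD k dflt = v k := by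
  induction L generalizing d with
  | nil => cases hk
  | cons a L ih =>
    simp only [List.foldl_cons]
    rcases List.mem_cons.mp hk with rfl | hk'
    · rw [foldl_insert_getD_not_mem _ _ _ _ _ (List.nodup_cons.mp hnd).1,
          PySem.Dict.getD_insert_self]
    · exact ih _ (List.nodup_cons.mp hnd).2 hk'

-- updating a set with elements it already has changes nothing
lemma set_update_of_subset (s : PySem.Set String) (xs : List String)
    (h : ∀ x ∈ xs, x ∈ s) : PySem.Set.update s xs = s := by
  induction xs generalizing s with
  | nil => rfl
  | cons x xs ih =>
    have hx : PySem.Set.add s x = s := by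
      simp [PySem.Set.add, PySem.Set.contains, h x List.mem_cons_self]
    simp only [PySem.Set.update, List.foldl_cons] at *
    rw [hx, ih s (fun y hy => h y (List.mem_cons_of_mem _ hy))]

-- a modify-loop keyed by architecture: getD at c folds the step over the matching elements
lemma getD_foldl_modify_step (xs : List String)
    (step : List String → String → List String)
    (d : PySem.Dict String (List String)) (c : String) :
    (xs.foldl (fun d g => d.modify (gpu2archA g) [] (fun b => step b g)) d).getD c []
      = (xs.filter (fun g => gpu2archA g == c)).foldl step (d.getD c []) := by
  induction xs generalizing d with
  | nil => rfl
  | cons x xs ih =>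
    by_cases h : gpu2archA x = c
    · subst h
      rw [List.foldl_cons, ih, PySem.Dict.getD_modify_self,
          List.filter_cons_of_pos (by simp), List.foldl_cons]
    · rw [List.foldl_cons, ih, PySem.Dict.getD_modify,
          if_neg (fun h' : c = gpu2archA x => h h'.symm),
          List.filter_cons_of_neg (by simp [h])]

-- ===== VERDICT (by name: the statement is the Claim_ definition above) =====
theorem cluster_gpus_spec : Claim_equal_cluster_gpus := by
  intro gpus _
  show cluster_gpus gpus = cluster_gpus_alt gpus
  set L := PySem.List.dedup (gpus.map gpu2archA) with hL
  have hLnd : L.Nodup := by rw [hL, PySem.List.dedup_eq_ofList]; exact PySem.Set.nodup_ofList _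
  -- ===== A's value =====
  have hcA : cluster_gpus gpus =
      ((pvGroup gpus).items.foldl
        (fun d kv => d.insert kv.1 (PySem.List.sorted kv.2 (fun x => x) false))
        (pvGroup gpus)).items := rfl
  have hitems : (pvGroup gpus).items =
      L.map (fun k => (k, gpus.filter (fun g => gpu2archA g == k))) := by
    rw [PySem.Dict.items_eq_map_keys _ (pvGroup_keys_nodup gpus) [], pvGroup_keys]
    exact List.map_congr_left (fun k _ => by rw [pvGroup_getD])
  rw [hcA, hitems, List.foldl_map]
  set d2 := L.foldl
    (fun d k => d.insert k
      (PySem.List.sorted (gpus.filter (fun g => gpu2archA g == k)) (fun x => x) false))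
    (pvGroup gpus) with hd2
  have hkeys : d2.keys = L := by
    have h := PySem.Dict.keys_foldl_insert_key L (fun k => k)
      (fun _ k => PySem.List.sorted (gpus.filter (fun g => gpu2archA g == k)) (fun x => x) false)
      (pvGroup gpus)
    rw [List.map_id', pvGroup_keys, ← hL] at h
    rw [hd2, h]
    exact set_update_of_subset _ _ (fun x hx => hx)
  have hnd2 : d2.keys.Nodup := by rw [hkeys]; exact hLnd
  rw [PySem.Dict.items_eq_map_keys d2 hnd2 [], hkeys]
  -- ===== B's value =====
  have harch : gpu2archB = gpu2archA := rfl
  have hcB : cluster_gpus_alt gpus =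
      (gpus.foldl (fun d g => d.modify (gpu2archA g) [] (fun b => insort b g))
        PySem.Dict.empty).items := by
    rw [show cluster_gpus_alt gpus =
      (gpus.foldl (fun d g => d.modify (gpu2archB g) [] (fun b => insort b g))
        PySem.Dict.empty).items from rfl, harch]
  set r := gpus.foldl (fun d g => d.modify (gpu2archA g) [] (fun b => insort b g))
    PySem.Dict.empty with hr
  have hrkeys : r.keys = L := by
    have h := PySem.Dict.keys_foldl_modify_key gpus gpu2archA []
      (fun _ g b => insort b g) (PySem.Dict.empty : PySem.Dict String (List String))
    rw [hr]
    simpa [hL, PySem.List.dedup_eq_ofList, PySem.Set.ofList, PySem.Set.update] using h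
  have hrnd : r.keys.Nodup := by rw [hrkeys]; exact hLnd
  rw [hcB, PySem.Dict.items_eq_map_keys r hrnd [], hrkeys]
  -- ===== the two value lists agree key by key =====
  refine List.map_congr_left (fun k hk => ?_)
  rw [hd2, foldl_insert_getD_mem L _ _ _ _ hLnd hk, hr, getD_foldl_modify_step,
      PySem.Dict.getD_empty, foldl_insort_eq_sorted]
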